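-- pv_equiv track=rewrite | github.com/jcccf/cs4740 | lib/DocFilterer.py | naive_filter_sentences_unweighted
-- ===== SOURCE A (Python) =====
-- def naive_filter_sentences_unweighted(keywords, sentences):
--   matches = []
--   keywords = [keyword.lower() for keyword in keywords]
--   for i, sentence in enumerate(sentences):
--     word_hash = { word:True for word in sentence }
--     count = 0
--     for keyword in keywords:
--       if keyword in word_hash: count += 1
--     if count > 0: matches.append((i, count))
--   return matches
-- ===== SOURCE B (Python) =====
-- def naive_filter_sentences_unweighted(keywords, sentences):
--   # Build a multiplicity table of lowered keywords once, then per sentence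
--   # sum the multiplicities of its distinct words.
--   kw = {}
--   for k in [x.lower() for x in keywords]:
--     kw[k] = kw.get(k, 0) + 1
--   matches = []
--   for i, sentence in enumerate(sentences):
--     count = sum(kw.get(w, 0) for w in set(sentence))
--     if count:
--       matches.append((i, count))
--   return matches
-- ===== Notes on version B (the rewrite author's own statement) =====
-- stated objective: faster
-- what changed: Builds a keyword-multiplicity dict once and, per sentence, sums multiplicities over the sentence's distinct words, instead of scanning the whole keyword list for every sentence.
import Mathlib
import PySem

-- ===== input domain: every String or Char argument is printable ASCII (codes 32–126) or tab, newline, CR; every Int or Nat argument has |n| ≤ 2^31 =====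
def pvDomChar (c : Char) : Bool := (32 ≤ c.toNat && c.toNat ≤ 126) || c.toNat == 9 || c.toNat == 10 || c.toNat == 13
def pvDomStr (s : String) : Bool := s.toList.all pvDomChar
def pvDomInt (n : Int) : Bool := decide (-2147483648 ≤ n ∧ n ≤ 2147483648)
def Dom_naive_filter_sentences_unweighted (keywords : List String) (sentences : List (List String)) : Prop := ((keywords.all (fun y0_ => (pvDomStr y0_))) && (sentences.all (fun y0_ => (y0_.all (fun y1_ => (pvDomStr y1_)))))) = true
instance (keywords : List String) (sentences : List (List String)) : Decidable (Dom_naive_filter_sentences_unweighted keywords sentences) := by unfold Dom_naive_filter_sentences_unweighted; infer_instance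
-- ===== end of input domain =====

-- B builds a lowered-keyword multiplicity dict once and sums multiplicities over each
-- sentence's distinct words, instead of scanning the whole keyword list per sentence.

-- ===== PORT A =====
def naive_filter_sentences_unweighted (keywords : List String) (sentences : List (List String)) : List (Int × Int) :=
  let kws := keywords.map PySem.Str.lower
  (PySem.List.enumerate sentences 0).foldl (fun acc p =>
    let word_hash : PySem.Dict String Bool :=
      p.2.foldl (fun d w => d.insert w true) PySem.Dict.empty
    let count : Int := kws.foldl (fun c k => if word_hash.contains k then c + 1 else c) 0
    if count > 0 then acc ++ [(p.1, count)] else acc) []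

-- ===== PORT B =====
def naive_filter_sentences_unweighted_alt (keywords : List String) (sentences : List (List String)) : List (Int × Int) :=
  let kw : PySem.Dict String Int :=
    (keywords.map PySem.Str.lower).foldl (fun d k => d.insert k (d.getD k 0 + 1)) PySem.Dict.empty
  (PySem.List.enumerate sentences 0).foldl (fun acc p =>
    let count : Int := ((PySem.Set.ofList p.2).map (fun w => kw.getD w 0)).sum
    if count ≠ 0 then acc ++ [(p.1, count)] else acc) []

-- ===== PRECONDITION & SPEC =====
def Spec_naive_filter_sentences_unweighted (keywords : List String) (sentences : List (List String)) (out : List (Int × Int)) : Prop := out = naive_filter_sentences_unweighted_alt keywords sentences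
instance (keywords : List String) (sentences : List (List String)) (out : List (Int × Int)) : Decidable (Spec_naive_filter_sentences_unweighted keywords sentences out) := by unfold Spec_naive_filter_sentences_unweighted; infer_instance

-- ===== CLAIM (what is proved, stated in full; the proofs are below) =====
def Claim_equal_naive_filter_sentences_unweighted : Prop := ∀ (keywords : List String) (sentences : List (List String)), Dom_naive_filter_sentences_unweighted keywords sentences → Spec_naive_filter_sentences_unweighted keywords sentences (naive_filter_sentences_unweighted keywords sentences)

-- ===== LEMMAS AND PROOFS =====

-- Sum over a list not containing k of the indicator of k is zero.
theorem pv_zero_sum (t : List String) (k : String) (hk : k ∉ t) :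
    (t.map (fun x => if x = k then (1 : Int) else 0)).sum = 0 := by
  induction t with
  | nil => simp
  | cons x xs ih =>
    simp only [List.mem_cons, not_or] at hk
    simp [Ne.symm hk.1, ih hk.2]

-- Sum over a duplicate-free list of the indicator of one element.
theorem pv_sum_indicator (ws : List String) (k : String) (h : ws.Nodup) :
    (ws.map (fun w => if w = k then (1 : Int) else 0)).sum = if k ∈ ws then 1 else 0 := by
  induction ws with
  | nil => simp
  | cons w t ih =>
    simp only [List.nodup_cons] at h
    by_cases hw : w = k
    · subst hw
      simp [pv_zero_sum t w h.1]
    · simp only [List.map_cons, List.sum_cons, hw, if_false, ih h.2,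
        List.mem_cons, Ne.symm hw, false_or, zero_add]

-- Double counting: summing keyword multiplicities over the distinct words equals
-- counting the keywords that occur among those words.
theorem pv_double_count (ks ws : List String) (h : ws.Nodup) :
    (ws.map (fun w => (ks.count w : Int))).sum
      = ((ks.countP (fun k => decide (k ∈ ws)) : Nat) : Int) := by
  induction ks with
  | nil => simp
  | cons k t ih =>
    have hsplit : (ws.map (fun w => ((k :: t).count w : Int))).sum
        = (ws.map (fun w => (t.count w : Int))).sum
          + (ws.map (fun w => if w = k then (1 : Int) else 0)).sum := by
      rw [← List.sum_map_add]
      refine congrArg List.sum (List.map_congr_left ?_)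
      intro w _
      rw [List.count_cons]
      push_cast
      by_cases hw : w = k
      · simp [hw]
      · simp [hw, Ne.symm hw]
    rw [hsplit, ih, pv_sum_indicator ws k h, List.countP_cons]
    by_cases hk : k ∈ ws <;> simp [hk]

-- Per-sentence equality of the two counts.
theorem pv_count_eq (ks s : List String) :
    ks.foldl (fun c k => if (s.foldl (fun d w => d.insert w true) (PySem.Dict.empty : PySem.Dict String Bool)).contains k then c + 1 else c) (0 : Int)
      = ((PySem.Set.ofList s).map (fun w =>
          (ks.foldl (fun d k => d.insert k (d.getD k 0 + 1)) (PySem.Dict.empty : PySem.Dict String Int)).getD w 0)).sum := by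
  have hwh : ∀ k : String,
      (s.foldl (fun d w => d.insert w true) (PySem.Dict.empty : PySem.Dict String Bool)).contains k
        = decide (k ∈ PySem.Set.ofList s) := by
    intro k
    rw [PySem.Dict.contains_eq_decide_mem_keys, PySem.Dict.keys_foldl_insert,
        PySem.Dict.keys_empty, PySem.Set.update_nil_left]
  have hkw : ∀ w : String,
      (ks.foldl (fun d k => d.insert k (d.getD k 0 + 1)) (PySem.Dict.empty : PySem.Dict String Int)).getD w 0
        = (ks.count w : Int) := by
    intro w
    rw [PySem.Dict.getD_foldl_insert_add_one, PySem.Dict.getD_empty, zero_add]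
  calc ks.foldl (fun c k => if (s.foldl (fun d w => d.insert w true) (PySem.Dict.empty : PySem.Dict String Bool)).contains k then c + 1 else c) (0 : Int)
      = ks.foldl (fun c k => if k ∈ PySem.Set.ofList s then c + 1 else c) (0 : Int) := by
        apply PySem.List.foldl_congr_mem
        intro c k _
        rw [hwh k]; by_cases hk : k ∈ PySem.Set.ofList s <;> simp [hk]
    _ = 0 + (ks.countP (fun k => decide (k ∈ PySem.Set.ofList s)) : Int) := by
        exact PySem.List.foldl_ite_add_one _ ks 0
    _ = ((PySem.Set.ofList s).map (fun w => (ks.count w : Int))).sum := by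
        rw [zero_add, pv_double_count ks _ (PySem.Set.nodup_ofList s)]
    _ = ((PySem.Set.ofList s).map (fun w =>
          (ks.foldl (fun d k => d.insert k (d.getD k 0 + 1)) (PySem.Dict.empty : PySem.Dict String Int)).getD w 0)).sum := by
        exact congrArg List.sum (List.map_congr_left (fun w _ => (hkw w).symm))

-- Both counts are the same cast of a natural number, so '> 0' and '≠ 0' agree.
theorem pv_count_nonneg (ks s : List String) :
    0 ≤ ((PySem.Set.ofList s).map (fun w =>
          (ks.foldl (fun d k => d.insert k (d.getD k 0 + 1)) (PySem.Dict.empty : PySem.Dict String Int)).getD w 0)).sum := by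
  rw [← pv_count_eq ks s, PySem.List.foldl_ite_add_one
    (fun k => (s.foldl (fun d w => d.insert w true) (PySem.Dict.empty : PySem.Dict String Bool)).contains k = true) ks 0]
  positivity

theorem naive_filter_sentences_unweighted_spec : Claim_equal_naive_filter_sentences_unweighted := by
  intro keywords sentences _
  unfold Spec_naive_filter_sentences_unweighted
  unfold naive_filter_sentences_unweighted naive_filter_sentences_unweighted_alt
  apply PySem.List.foldl_congr_mem
  intro acc p _
  have hc := pv_count_eq (keywords.map PySem.Str.lower) p.2
  have hnn := pv_count_nonneg (keywords.map PySem.Str.lower) p.2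
  simp only [hc]
  by_cases h0 : ((PySem.Set.ofList p.2).map (fun w =>
      ((keywords.map PySem.Str.lower).foldl (fun d k => d.insert k (d.getD k 0 + 1)) (PySem.Dict.empty : PySem.Dict String Int)).getD w 0)).sum = 0
  · simp [h0]
  · have : 0 < ((PySem.Set.ofList p.2).map (fun w =>
      ((keywords.map PySem.Str.lower).foldl (fun d k => d.insert k (d.getD k 0 + 1)) (PySem.Dict.empty : PySem.Dict String Int)).getD w 0)).sum := lt_of_le_of_ne hnn (Ne.symm h0)
    simp [h0, this]
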